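-- pv_equiv track=rewrite | github.com/samlee405/Coding-Challenges | GoogleFoobarChallenges/3rdChallengePart1.py | answer
-- ===== SOURCE A (Python) =====
-- def answer(start, length):
--     currentIDValue = start
--     valueToReturn = 0
--     numberOfValuesToPass = length - 1
--
--     while numberOfValuesToPass >= 0:
--         currentIDValue += length - 1
--         if currentIDValue % 4 == 0:
--             valueToReturn ^= currentIDValue
--             valueToReturn ^= cancelLowerValues(currentIDValue - numberOfValuesToPass - 1)
--         elif currentIDValue % 4 == 1:
--             valueToReturn ^= 1
--             valueToReturn ^= cancelLowerValues(currentIDValue - numberOfValuesToPass - 1)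
--         elif currentIDValue % 4 == 2:
--             valueToReturn ^= currentIDValue + 1
--             valueToReturn ^= cancelLowerValues(currentIDValue - numberOfValuesToPass - 1)
--         else:
--             valueToReturn ^= 0
--             valueToReturn ^= cancelLowerValues(currentIDValue - numberOfValuesToPass - 1)
--
--         numberOfValuesToPass -= 1
--
--     return valueToReturn
--
-- def cancelLowerValues(high):
--     if high % 4 == 0:
--         return (high)
--     elif high % 4 == 1:
--         return 1
--     elif high % 4 == 2:
--         return (high + 1)
--     else:
--         return 0
-- ===== SOURCE B (Python) =====
-- def xor_range(lo, hi):
--     # XOR of the consecutive integers lo..hi, via the period-4 prefix pattern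
--     def g(n):
--         return (n, 1, n + 1, 0)[n % 4]
--     return g(hi) ^ g(lo - 1)
--
-- def answer(start, length):
--     if length <= 0:
--         return 0
--     # XOR of the whole length x length square of IDs ...
--     total = xor_range(start, start + length * length - 1)
--     # ... then cancel the excluded top-right corner: row i drops its last i IDs
--     for i in range(1, length):
--         row_end = start + (i + 1) * length - 1
--         total ^= xor_range(row_end - i + 1, row_end)
--     return total
-- ===== Notes on version B (the rewrite author's own statement) =====
-- stated objective: alternative
-- what changed: B XORs the whole length-by-length square of IDs in one range-XOR and then cancels the excluded top-right suffix of each row, instead of A's row-by-row accumulation over the kept prefixes with a running ID counter and countdown.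
import Mathlib
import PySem

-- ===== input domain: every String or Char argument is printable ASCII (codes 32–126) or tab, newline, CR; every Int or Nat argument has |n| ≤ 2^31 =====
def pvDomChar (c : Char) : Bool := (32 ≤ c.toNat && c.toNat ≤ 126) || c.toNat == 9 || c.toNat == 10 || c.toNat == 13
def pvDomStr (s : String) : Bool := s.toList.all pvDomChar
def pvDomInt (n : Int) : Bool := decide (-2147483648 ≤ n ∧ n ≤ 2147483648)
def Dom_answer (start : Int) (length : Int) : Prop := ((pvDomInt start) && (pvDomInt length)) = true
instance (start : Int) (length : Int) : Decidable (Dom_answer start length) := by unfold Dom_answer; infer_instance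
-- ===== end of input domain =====

-- B computes the XOR of the whole length×length square of IDs with one range-XOR and then
-- cancels the excluded top-right suffix of each row, instead of A's row-by-row accumulation
-- over the kept prefixes with a running ID counter (objective: alternative decomposition).

-- ===== PORT A =====
def cancelLowerValues (high : Int) : Int :=
  if PySem.Int.mod high 4 = 0 then high
  else if PySem.Int.mod high 4 = 1 then 1
  else if PySem.Int.mod high 4 = 2 then high + 1
  else 0

-- A's while-loop: `numberOfValuesToPass` starts at length-1 and drops by 1 each pass,
-- so the loop runs exactly length.toNat times — that trip count is the fuel.
def answerLoop (length : Int) : Nat → Int → Int → Int → Int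
  | 0, _, valueToReturn, _ => valueToReturn
  | n + 1, currentIDValue, valueToReturn, numberOfValuesToPass =>
    let c := currentIDValue + (length - 1)
    let v :=
      if PySem.Int.mod c 4 = 0 then
        PySem.Int.bxor (PySem.Int.bxor valueToReturn c)
          (cancelLowerValues (c - numberOfValuesToPass - 1))
      else if PySem.Int.mod c 4 = 1 then
        PySem.Int.bxor (PySem.Int.bxor valueToReturn 1)
          (cancelLowerValues (c - numberOfValuesToPass - 1))
      else if PySem.Int.mod c 4 = 2 then
        PySem.Int.bxor (PySem.Int.bxor valueToReturn (c + 1))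
          (cancelLowerValues (c - numberOfValuesToPass - 1))
      else
        PySem.Int.bxor (PySem.Int.bxor valueToReturn 0)
          (cancelLowerValues (c - numberOfValuesToPass - 1))
    answerLoop length n c v (numberOfValuesToPass - 1)

def answer (start : Int) (length : Int) : Int :=
  answerLoop length length.toNat start 0 (length - 1)

-- ===== PORT B =====
-- Source B's inner helper g: tuple indexing (n, 1, n+1, 0)[n % 4]; the index n % 4 is
-- always in 0..3, so the .getD default is never used (pyGet? is some on every input).
def prefixXor (n : Int) : Int :=
  (PySem.List.pyGet? [n, 1, n + 1, 0] (PySem.Int.mod n 4)).getD 0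

-- Source B's xor_range(lo, hi): XOR of the consecutive integers lo..hi
def xorRange (lo : Int) (hi : Int) : Int :=
  PySem.Int.bxor (prefixXor hi) (prefixXor (lo - 1))

def answer_alt (start : Int) (length : Int) : Int :=
  if length ≤ 0 then 0
  else
    (PySem.List.pyRange 1 length 1).foldl
      (fun total i =>
        let rowEnd := start + (i + 1) * length - 1
        PySem.Int.bxor total (xorRange (rowEnd - i + 1) rowEnd))
      (xorRange start (start + length * length - 1))

-- ===== PRECONDITION & SPEC =====
def Spec_answer (start : Int) (length : Int) (out : Int) : Prop := out = answer_alt start length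
instance (start : Int) (length : Int) (out : Int) : Decidable (Spec_answer start length out) := by unfold Spec_answer; infer_instance

-- ===== CLAIM (what is proved, stated in full; the proofs are below) =====
def Claim_equal_answer : Prop := ∀ (start : Int) (length : Int), Dom_answer start length → Spec_answer start length (answer start length)

-- ===== LEMMAS AND PROOFS =====

-- XOR algebra for PySem.Int.bxor via the (sign, magnitude) encoding ---------------

def pvEncS (a : Int) : Bool := decide (a < 0)
def pvEncM (a : Int) : Nat := if 0 ≤ a then a.toNat else (-a - 1).toNat

lemma pvEnc_eq (x y : Int) (hs : pvEncS x = pvEncS y) (hm : pvEncM x = pvEncM y) : x = y := by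
  unfold pvEncS at hs
  unfold pvEncM at hm
  simp only [decide_eq_decide] at hs
  split_ifs at hm <;> omega

lemma pvEncS_bxor (a b : Int) : pvEncS (PySem.Int.bxor a b) = xor (pvEncS a) (pvEncS b) := by
  unfold pvEncS PySem.Int.bxor
  by_cases ha : 0 ≤ a <;> by_cases hb : 0 ≤ b
  · rw [if_pos ha, if_pos hb, decide_eq_false (by omega : ¬ a < 0),
      decide_eq_false (by omega : ¬ b < 0),
      decide_eq_false (by omega : ¬ ((a.toNat ^^^ b.toNat : Nat) : Int) < 0)]
    rfl
  · rw [if_pos ha, if_neg hb, decide_eq_false (by omega : ¬ a < 0),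
      decide_eq_true (by omega : b < 0),
      decide_eq_true (by omega : (-((a.toNat ^^^ (-b - 1).toNat : Nat) : Int) - 1) < 0)]
    rfl
  · rw [if_neg ha, if_pos hb, decide_eq_true (by omega : a < 0),
      decide_eq_false (by omega : ¬ b < 0),
      decide_eq_true (by omega : (-(((-a - 1).toNat ^^^ b.toNat : Nat) : Int) - 1) < 0)]
    rfl
  · rw [if_neg ha, if_neg hb, decide_eq_true (by omega : a < 0),
      decide_eq_true (by omega : b < 0),
      decide_eq_false (by omega : ¬ (((-a - 1).toNat ^^^ (-b - 1).toNat : Nat) : Int) < 0)]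
    rfl

lemma pvEncM_bxor (a b : Int) : pvEncM (PySem.Int.bxor a b) = (pvEncM a) ^^^ (pvEncM b) := by
  unfold pvEncM PySem.Int.bxor
  by_cases ha : 0 ≤ a <;> by_cases hb : 0 ≤ b
  · simp only [if_pos ha, if_pos hb,
      if_pos (by omega : (0:Int) ≤ ((a.toNat ^^^ b.toNat : Nat) : Int))]
    omega
  · simp only [if_pos ha, if_neg hb,
      if_neg (by omega : ¬ (0:Int) ≤ -((a.toNat ^^^ (-b - 1).toNat : Nat) : Int) - 1)]
    omega
  · simp only [if_neg ha, if_pos hb,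
      if_neg (by omega : ¬ (0:Int) ≤ -(((-a - 1).toNat ^^^ b.toNat : Nat) : Int) - 1)]
    omega
  · simp only [if_neg ha, if_neg hb,
      if_pos (by omega : (0:Int) ≤ (((-a - 1).toNat ^^^ (-b - 1).toNat : Nat) : Int))]
    omega

lemma bxor_assoc (a b c : Int) :
    PySem.Int.bxor (PySem.Int.bxor a b) c = PySem.Int.bxor a (PySem.Int.bxor b c) := by
  apply pvEnc_eq
  · simp [pvEncS_bxor]
  · simp [pvEncM_bxor, Nat.xor_assoc]

lemma bxor_left_comm (a b c : Int) :
    PySem.Int.bxor a (PySem.Int.bxor b c) = PySem.Int.bxor b (PySem.Int.bxor a c) := by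
  rw [← bxor_assoc, PySem.Int.bxor_comm a b, bxor_assoc]

lemma zero_bxor (a : Int) : PySem.Int.bxor 0 a = a := by
  rw [PySem.Int.bxor_comm]; exact PySem.Int.bxor_zero a

lemma bxor_cancel_left (a b : Int) : PySem.Int.bxor a (PySem.Int.bxor a b) = b := by
  rw [← bxor_assoc, PySem.Int.bxor_self, zero_bxor]

-- Source B's g agrees with A's cancelLowerValues pointwise ---------------------------

lemma prefixXor_eq_cancel (n : Int) : prefixXor n = cancelLowerValues n := by
  have h0 : 0 ≤ PySem.Int.mod n 4 := PySem.Int.mod_nonneg n (by norm_num)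
  have h4 : PySem.Int.mod n 4 < 4 := PySem.Int.mod_lt n (by norm_num)
  unfold prefixXor cancelLowerValues
  interval_cases h : PySem.Int.mod n 4 <;> simp [PySem.List.pyGet?, PySem.List.pyIdx?]

lemma answer_step (v c y : Int) :
    (if PySem.Int.mod c 4 = 0 then
        PySem.Int.bxor (PySem.Int.bxor v c) (cancelLowerValues y)
      else if PySem.Int.mod c 4 = 1 then
        PySem.Int.bxor (PySem.Int.bxor v 1) (cancelLowerValues y)
      else if PySem.Int.mod c 4 = 2 then
        PySem.Int.bxor (PySem.Int.bxor v (c + 1)) (cancelLowerValues y)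
      else
        PySem.Int.bxor (PySem.Int.bxor v 0) (cancelLowerValues y))
    = PySem.Int.bxor (PySem.Int.bxor v (cancelLowerValues c)) (cancelLowerValues y) := by
  unfold cancelLowerValues
  split_ifs <;> rfl

-- A's loop as a fold of per-row range-XORs over the row indices 0..length-1 ------

lemma answerLoop_eq_fold (start length : Int) (n : Nat) :
    ∀ (k : Nat) (v : Int), (k : Int) + n = length →
      answerLoop length n (start + k * (length - 1)) v (length - 1 - k)
        = (PySem.List.pyRange k length 1).foldl
            (fun checksum row =>
              let lo := start + row * length
              PySem.Int.bxor (PySem.Int.bxor checksum (prefixXor (lo + length - 1 - row)))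
                (prefixXor (lo - 1))) v := by
  induction n with
  | zero =>
    intro k v hk
    have : ((length : Int) - k).toNat = 0 := by omega
    simp [answerLoop, PySem.List.pyRange_one, this]
  | succ m ih =>
    intro k v hk
    have hklt : (k : Int) < length := by omega
    rw [PySem.List.pyRange_one_cons hklt]
    simp only [List.foldl_cons]
    show answerLoop length (m + 1) (start + k * (length - 1)) v (length - 1 - k) = _
    rw [answerLoop]
    simp only [answer_step]
    have hc : start + (k : Int) * (length - 1) + (length - 1)
        = start + (k : Int) * length + length - 1 - k := by ring
    rw [hc]
    have hy : start + (k : Int) * length + length - 1 - k - (length - 1 - k) - 1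
        = start + (k : Int) * length - 1 := by ring
    rw [hy, ← prefixXor_eq_cancel, ← prefixXor_eq_cancel]
    have hnext := ih (k + 1)
      (PySem.Int.bxor
        (PySem.Int.bxor v (prefixXor (start + (k : Int) * length + length - 1 - k)))
        (prefixXor (start + (k : Int) * length - 1)))
      (by push_cast; omega)
    have h1 : start + ((k : Int) + 1) * (length - 1)
      = start + (k : Int) * length + length - 1 - k + (length - 1) - (length - 1) := by ring
    have h2 : (length : Int) - 1 - ((k : Int) + 1) = length - 1 - k - 1 := by ring
    push_cast at hnext
    rw [h1, h2] at hnext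
    rw [show start + (k : Int) * length + length - 1 - k + (length - 1) - (length - 1)
        = start + (k : Int) * length + length - 1 - k from by ring] at hnext
    exact hnext

-- Factor the initial accumulator out of an XOR-accumulating fold -----------------

lemma foldl_bxor_init (h : Int → Int) (l : List Int) :
    ∀ v : Int, l.foldl (fun a x => PySem.Int.bxor a (h x)) v
      = PySem.Int.bxor v (l.foldl (fun a x => PySem.Int.bxor a (h x)) 0) := by
  induction l with
  | nil => intro v; simp [PySem.Int.bxor_zero]
  | cons x l ih =>
    intro v
    simp only [List.foldl_cons]
    rw [ih (PySem.Int.bxor v (h x)), ih (PySem.Int.bxor 0 (h x)), zero_bxor, bxor_assoc]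

-- The telescoping identity: A's fold over the kept rows equals the square's
-- range-XOR cancelled by the fold over the excluded row suffixes.

lemma tele (start L : Int) : ∀ (k : Nat), 1 ≤ k →
    (PySem.List.pyRange 0 (k : Int) 1).foldl
        (fun checksum row =>
          PySem.Int.bxor
            (PySem.Int.bxor checksum (prefixXor (start + row * L + L - 1 - row)))
            (prefixXor (start + row * L - 1))) 0
    = PySem.Int.bxor
        (PySem.Int.bxor (prefixXor (start + (k : Int) * L - 1)) (prefixXor (start - 1)))
        ((PySem.List.pyRange 1 (k : Int) 1).foldl
          (fun total i =>
            PySem.Int.bxor total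
              (xorRange (start + (i + 1) * L - 1 - i + 1) (start + (i + 1) * L - 1))) 0) := by
  intro k hk
  induction k with
  | zero => omega
  | succ m ih =>
    by_cases hm : 1 ≤ m
    · have h0m : (0 : Int) ≤ (m : Int) := by positivity
      have h1m : (1 : Int) ≤ (m : Int) := by exact_mod_cast hm
      have hcast : ((m + 1 : Nat) : Int) = (m : Int) + 1 := by push_cast; ring
      rw [hcast, PySem.List.pyRange_one_succ_right h0m, PySem.List.pyRange_one_succ_right h1m]
      rw [List.foldl_append, List.foldl_append]
      simp only [List.foldl_cons, List.foldl_nil]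
      rw [ih hm]
      simp only [xorRange]
      have e1 : start + ((m : Int) + 1) * L - 1 - (m : Int) + 1 - 1
          = start + (m : Int) * L + L - 1 - (m : Int) := by ring
      rw [e1]
      generalize prefixXor (start + (m : Int) * L + L - 1 - (m : Int)) = c
      generalize prefixXor (start + (m : Int) * L - 1) = b
      generalize prefixXor (start + ((m : Int) + 1) * L - 1) = d
      generalize prefixXor (start - 1) = a
      generalize (PySem.List.pyRange 1 (m : Int) 1).foldl _ 0 = e
      simp only [bxor_assoc, bxor_left_comm, PySem.Int.bxor_comm, bxor_cancel_left]
    · have hm0 : m = 0 := by omega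
      subst hm0
      have hr0 : PySem.List.pyRange 0 ((1 : Nat) : Int) 1 = [0] := by
        have h01 : ((1 : Nat) : Int) = 0 + 1 := by norm_num
        rw [h01]
        exact PySem.List.pyRange_one_singleton 0
      have hr1 : PySem.List.pyRange 1 ((1 : Nat) : Int) 1 = [] := by
        exact PySem.List.pyRange_one_eq_nil (by norm_num)
      rw [hr0, hr1]
      simp only [List.foldl_cons, List.foldl_nil]
      rw [zero_bxor]
      rw [show start + 0 * L + L - 1 - 0 = start + 1 * L - 1 from by ring]
      rw [show start + 0 * L - 1 = start - 1 from by ring]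
      rw [PySem.Int.bxor_zero]
      norm_num

-- ===== VERDICT (by name: the statement is the Claim_ definition above) =====
theorem answer_spec : Claim_equal_answer := by
  intro start length _
  unfold Spec_answer answer
  by_cases hle : length ≤ 0
  · have h0 : length.toNat = 0 := by omega
    simp [h0, answerLoop, answer_alt, hle]
  · have hpos : 0 < length := by omega
    have h := answerLoop_eq_fold start length length.toNat 0 0 (by omega)
    simp only [Nat.cast_zero, zero_mul, add_zero, sub_zero] at h
    have hk : 1 ≤ length.toNat := by omega
    have hcast : ((length.toNat : Int)) = length := by omega
    have ht := tele start length length.toNat hk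
    rw [hcast] at ht
    rw [h, ht]
    simp only [answer_alt, if_neg hle]
    rw [foldl_bxor_init
      (fun i => xorRange (start + (i + 1) * length - 1 - i + 1) (start + (i + 1) * length - 1))]
    simp only [xorRange]
    rw [zero_bxor]
    conv_rhs => rw [foldl_bxor_init (fun i => PySem.Int.bxor
      (prefixXor (start + (i + 1) * length - 1))
      (prefixXor (start + (i + 1) * length - 1 - i + 1 - 1)))]
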